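-- pv_equiv track=rewrite | github.com/rachelwhy/Respond-in-90-seconds | src/core/profile.py | _collect_paragraphs_up_to_chars
-- ===== SOURCE A (Python) =====
-- def _collect_paragraphs_up_to_chars(paragraphs: list, max_chars: int) -> list:
--     """按顺序收集段落，直到达到目标字符数
--
--     Args:
--         paragraphs: 段落列表
--         max_chars: 最大字符数
--
--     Returns:
--         收集的段落列表
--     """
--     result = []
--     current_chars = 0
--     for para in paragraphs:
--         if current_chars + len(para) <= max_chars:
--             result.append(para)
--             current_chars += len(para)
--         else:
--             break
--     return result
-- ===== SOURCE B (Python) =====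
-- def _collect_paragraphs_up_to_chars(paragraphs: list, max_chars: int) -> list:
--     # Prefix-sum table: sums[i] = total chars of paragraphs[0..i].
--     sums = []
--     total = 0
--     for p in paragraphs:
--         total += len(p)
--         sums.append(total)
--     # Binary search (bisect_right) for max_chars: sums is non-decreasing
--     # because lengths are non-negative, so the admissible prefixes are
--     # exactly the first `lo` ones.
--     lo, hi = 0, len(sums)
--     while lo < hi:
--         mid = (lo + hi) // 2
--         if sums[mid] <= max_chars:
--             lo = mid + 1
--         else:
--             hi = mid
--     return paragraphs[:lo]
-- ===== Notes on version B (the rewrite author's own statement) =====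
-- stated objective: alternative
-- what changed: Replaces the fused running-sum early-break loop by building a prefix-sum table and binary-searching it (bisect_right style) for the cutoff, then slicing paragraphs[:lo]; correct because lengths are non-negative so the table is non-decreasing.
import Mathlib
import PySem

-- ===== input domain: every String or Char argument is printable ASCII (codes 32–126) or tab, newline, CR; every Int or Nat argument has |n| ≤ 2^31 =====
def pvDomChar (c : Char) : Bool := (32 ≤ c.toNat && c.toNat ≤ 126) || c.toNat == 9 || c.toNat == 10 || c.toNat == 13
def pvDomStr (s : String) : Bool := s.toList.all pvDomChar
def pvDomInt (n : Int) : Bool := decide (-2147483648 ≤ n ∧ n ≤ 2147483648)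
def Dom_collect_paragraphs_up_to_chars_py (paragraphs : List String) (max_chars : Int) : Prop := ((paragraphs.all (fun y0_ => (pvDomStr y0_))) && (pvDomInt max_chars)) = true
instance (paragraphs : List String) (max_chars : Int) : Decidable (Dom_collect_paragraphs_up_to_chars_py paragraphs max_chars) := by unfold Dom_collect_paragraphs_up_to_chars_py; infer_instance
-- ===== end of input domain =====

-- ===== PORT A =====
-- B replaces A's fused running-sum early-break loop with a prefix-sum table,
-- a binary search for the cutoff, and a slice (alternative decomposition).
def collectLoopA (mc : Int) : List String → Int → List String
  | [], _ => []
  | p :: ps, cur =>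
    if cur + (PySem.Str.len p : Int) ≤ mc then
      p :: collectLoopA mc ps (cur + (PySem.Str.len p : Int))
    else []

def collect_paragraphs_up_to_chars_py (paragraphs : List String) (max_chars : Int) : List String :=
  collectLoopA max_chars paragraphs 0

-- ===== PORT B =====
-- the prefix-sum table `sums` (the for-loop appending `total`)
def pyBSums : List String → Int → List Int
  | [], _ => []
  | p :: ps, total => (total + (PySem.Str.len p : Int)) :: pyBSums ps (total + (PySem.Str.len p : Int))

-- the `while lo < hi` binary search; sums[mid] is exact as getD because
-- mid < hi ≤ len sums throughout the loop; the fuel counter only makes the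
-- loop structurally total (hi - lo shrinks each step, so len sums suffices)
def pyBSearch (sums : List Int) (mc : Int) : Nat → Nat → Nat → Nat
  | 0, lo, _ => lo
  | fuel + 1, lo, hi =>
    if lo < hi then
      let mid := (lo + hi) / 2
      if sums.getD mid 0 ≤ mc then pyBSearch sums mc fuel (mid + 1) hi
      else pyBSearch sums mc fuel lo mid
    else lo

def collect_paragraphs_up_to_chars_py_alt (paragraphs : List String) (max_chars : Int) : List String :=
  let sums := pyBSums paragraphs 0
  let lo := pyBSearch sums max_chars sums.length 0 sums.length
  paragraphs.take lo

-- ===== PRECONDITION & SPEC =====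
def Spec_collect_paragraphs_up_to_chars_py (paragraphs : List String) (max_chars : Int) (out : List String) : Prop := out = collect_paragraphs_up_to_chars_py_alt paragraphs max_chars
instance (paragraphs : List String) (max_chars : Int) (out : List String) : Decidable (Spec_collect_paragraphs_up_to_chars_py paragraphs max_chars out) := by unfold Spec_collect_paragraphs_up_to_chars_py; infer_instance

-- ===== CLAIM (what is proved, stated in full; the proofs are below) =====
def Claim_equal_collect_paragraphs_up_to_chars_py : Prop := ∀ (paragraphs : List String) (max_chars : Int), Dom_collect_paragraphs_up_to_chars_py paragraphs max_chars → Spec_collect_paragraphs_up_to_chars_py paragraphs max_chars (collect_paragraphs_up_to_chars_py paragraphs max_chars)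

-- ===== LEMMAS AND PROOFS =====

-- A's loop takes the longest prefix whose prefix sums stay within mc
theorem collectLoop_eq_take (mc : Int) (ps : List String) (c : Int) :
    collectLoopA mc ps c = ps.take ((pyBSums ps c).takeWhile (fun s => s ≤ mc)).length := by
  induction ps generalizing c with
  | nil => simp [collectLoopA, pyBSums]
  | cons p rest ih =>
    simp only [PySem.Str.len_eq] at *
    by_cases h : c + (p.length : Int) ≤ mc <;>
      simp [collectLoopA, pyBSums, List.takeWhile, h, ih]

-- every entry of the prefix-sum table is ≥ the starting accumulator
theorem bsums_ge (ps : List String) (c : Int) : ∀ x ∈ pyBSums ps c, c ≤ x := by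
  induction ps generalizing c with
  | nil => simp [pyBSums]
  | cons p rest ih =>
    intro x hx
    simp only [pyBSums, List.mem_cons] at hx
    rcases hx with rfl | hx
    · simp only [PySem.Str.len_eq]
      have := Int.natCast_nonneg (String.length p)
      omega
    · have h1 := ih (c + (PySem.Str.len p : Int)) x hx
      simp only [PySem.Str.len_eq] at h1
      have := Int.natCast_nonneg (String.length p)
      omega

theorem bsums_pairwise (ps : List String) (c : Int) :
    List.Pairwise (· ≤ ·) (pyBSums ps c) := by
  induction ps generalizing c with
  | nil => simp [pyBSums]
  | cons p rest ih =>
    simp only [pyBSums, List.pairwise_cons]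
    exact ⟨bsums_ge rest _, ih _⟩

theorem pairwise_getD (l : List Int) (h : List.Pairwise (· ≤ ·) l) (i j : Nat)
    (hij : i ≤ j) (hj : j < l.length) : l.getD i 0 ≤ l.getD j 0 := by
  rcases Nat.lt_or_ge i j with hlt | hge
  · have hi : i < l.length := Nat.lt_trans hlt hj
    rw [List.getD_eq_getElem l 0 hi, List.getD_eq_getElem l 0 hj]
    exact List.pairwise_iff_getElem.mp h i j hi hj hlt
  · have : i = j := Nat.le_antisymm hij hge
    subst this; exact le_refl _

theorem tw_lt (p : Int → Bool) (l : List Int) (i : Nat)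
    (h : i < (l.takeWhile p).length) : p (l.getD i 0) = true := by
  induction l generalizing i with
  | nil => simp [List.takeWhile] at h
  | cons a rest ih =>
    by_cases hp : p a
    · cases i with
      | zero => simpa using hp
      | succ n =>
        simp [List.takeWhile, hp] at h
        simpa using ih n (by omega)
    · simp [List.takeWhile, hp] at h

theorem tw_at (p : Int → Bool) (l : List Int)
    (h : (l.takeWhile p).length < l.length) :
    p (l.getD (l.takeWhile p).length 0) = false := by
  induction l with
  | nil => simp at h
  | cons a rest ih =>
    by_cases hp : p a
    · simp [List.takeWhile, hp] at h ⊢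
      exact ih (by omega)
    · simpa [List.takeWhile, hp] using hp

theorem tw_len_le (p : Int → Bool) (l : List Int) :
    (l.takeWhile p).length ≤ l.length :=
  (List.takeWhile_sublist p).length_le

-- at loop exit, lo is the length of the admissible prefix
theorem bs_final (sums : List Int) (mc : Int) (lo : Nat) (hlen : lo ≤ sums.length)
    (hA : ∀ i, i < lo → sums.getD i 0 ≤ mc)
    (hB : ∀ j, lo ≤ j → j < sums.length → ¬ sums.getD j 0 ≤ mc) :
    lo = (sums.takeWhile (fun s => s ≤ mc)).length := by
  set tw := (sums.takeWhile (fun s => s ≤ mc)).length with htw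
  have htwle : tw ≤ sums.length := tw_len_le _ sums
  rcases Nat.lt_trichotomy lo tw with h | h | h
  · exfalso
    have hp := tw_lt (fun s => decide (s ≤ mc)) sums lo h
    simp at hp
    exact hB lo (le_refl _) (by omega) hp
  · exact h
  · exfalso
    have hp := tw_at (fun s => decide (s ≤ mc)) sums (by omega)
    simp at hp
    rw [← htw] at hp
    have h2 := hA tw h
    simp only [List.getD] at h2
    omega

-- binary-search invariant: under the standard invariant (enough fuel, every
-- index below lo admissible, every index from hi on not), the loop returns
-- the length of the admissible prefix
theorem bs_eq (sums : List Int) (mc : Int) (mono : List.Pairwise (· ≤ ·) sums) :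
    ∀ fuel lo hi, hi - lo ≤ fuel → lo ≤ hi → hi ≤ sums.length →
    (∀ i, i < lo → sums.getD i 0 ≤ mc) →
    (∀ j, hi ≤ j → j < sums.length → ¬ sums.getD j 0 ≤ mc) →
    pyBSearch sums mc fuel lo hi = (sums.takeWhile (fun s => s ≤ mc)).length := by
  intro fuel
  induction fuel with
  | zero =>
    intro lo hi hfuel hlohi hhilen hA hB
    have : lo = hi := by omega
    subst this
    exact bs_final sums mc lo hhilen hA hB
  | succ n ih =>
    intro lo hi hfuel hlohi hhilen hA hB
    simp only [pyBSearch]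
    by_cases hlt : lo < hi
    · simp only [hlt, if_true]
      have hmid : (lo + hi) / 2 < sums.length := by omega
      by_cases hP : sums.getD ((lo + hi) / 2) 0 ≤ mc
      · simp only [hP, if_true]
        refine ih _ _ (by omega) (by omega) hhilen ?_ hB
        intro i hi'
        exact le_trans (pairwise_getD sums mono i ((lo + hi) / 2) (by omega) hmid) hP
      · simp only [hP, if_false]
        refine ih _ _ (by omega) (by omega) (by omega) hA ?_
        intro j hj hjlen hle
        exact hP (le_trans (pairwise_getD sums mono ((lo + hi) / 2) j hj hjlen) hle)
    · simp only [hlt, if_false]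
      have heq : lo = hi := by omega
      subst heq
      exact bs_final sums mc lo hhilen hA hB

-- ===== VERDICT (by name: the statement is the Claim_ definition above) =====
theorem collect_paragraphs_up_to_chars_py_spec : Claim_equal_collect_paragraphs_up_to_chars_py := by
  intro ps mc _
  show collect_paragraphs_up_to_chars_py ps mc = collect_paragraphs_up_to_chars_py_alt ps mc
  have hbs := bs_eq (pyBSums ps 0) mc (bsums_pairwise ps 0)
      (pyBSums ps 0).length 0 (pyBSums ps 0).length (by omega) (Nat.zero_le _) (le_refl _)
      (by intro i h; omega) (by intro j hj hjlen; omega)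
  simp only [collect_paragraphs_up_to_chars_py, collect_paragraphs_up_to_chars_py_alt, hbs]
  exact collectLoop_eq_take mc ps 0
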